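-- pv_equiv track=rewrite | github.com/HandyWote/Py-Algorithm | 题目描述.py | solve
-- ===== SOURCE A (Python) =====
-- from collections import defaultdict
-- from typing import List, Set
--
-- def solve(n: int, k: int, edges: List[List[int]]) -> int:
--     # 构建邻接表表示的图
--     graph = defaultdict(list)
--     for u, v in edges:
--         graph[u].append(v)
--         graph[v].append(u)
--
--     def dfs(node: int, visited: Set[int], purple: Set[int]) -> int:
--         # 如果当前节点是紫色，返回0
--         if node in purple:
--             return 0
--
--         # 标记当前节点为已访问
--         visited.add(node)
--         size = 1  # 当前节点计入连通块大小
--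
--         # 遍历所有相邻节点
--         for neighbor in graph[node]:
--             if neighbor not in visited:
--                 size += dfs(neighbor, visited, purple)
--
--         return size
--
--     def get_max_component_size(purple: Set[int]) -> int:
--         visited = set()
--         max_size = 0
--
--         # 遍历所有节点，找到最大的红色连通块
--         for node in range(1, n + 1):
--             if node not in visited and node not in purple:
--                 max_size = max(max_size, dfs(node, visited, purple))
--
--         return max_size
--
--     # 如果可以将所有节点都染成紫色
--     if k >= n:
--         return 0
--
--     # 贪心策略：选择将关键节点染成紫色
--     # 这里我们选择度数最大的节点进行染色
--     degree = [(len(graph[i]), i) for i in range(1, n + 1)]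
--     degree.sort(reverse=True)
--
--     # 选择前k个度数最大的节点染成紫色
--     purple = set(node for _, node in degree[:k])
--
--     return get_max_component_size(purple)
-- ===== SOURCE B (Python) =====
-- from collections import defaultdict
--
-- def solve(n, k, edges):
--     # Same graph build and purple selection as the original; the component search is
--     # an iterative frontier BFS instead of the recursive DFS.
--     graph = defaultdict(list)
--     for u, v in edges:
--         graph[u].append(v)
--         graph[v].append(u)
--     if k >= n:
--         return 0
--     degree = [(len(graph[i]), i) for i in range(1, n + 1)]
--     degree.sort(reverse=True)
--     purple = set(node for _, node in degree[:k])
--     best = 0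
--     seen = set()
--     for s in range(1, n + 1):
--         if s in seen or s in purple:
--             continue
--         comp = {s}
--         frontier = [s]
--         while frontier:
--             nxt = []
--             for x in frontier:
--                 for y in graph[x]:
--                     if y not in purple and y not in comp:
--                         comp.add(y)
--                         nxt.append(y)
--             frontier = nxt
--         seen |= comp
--         best = max(best, len(comp))
--     return best
-- ===== Notes on version B (the rewrite author's own statement) =====
-- stated objective: alternative
-- what changed: The recursive DFS with a shared visited set threaded through nested recursion is replaced by an iterative frontier-based BFS per unexplored node; graph build and top-k-degree purple selection are unchanged.
import Mathlib
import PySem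

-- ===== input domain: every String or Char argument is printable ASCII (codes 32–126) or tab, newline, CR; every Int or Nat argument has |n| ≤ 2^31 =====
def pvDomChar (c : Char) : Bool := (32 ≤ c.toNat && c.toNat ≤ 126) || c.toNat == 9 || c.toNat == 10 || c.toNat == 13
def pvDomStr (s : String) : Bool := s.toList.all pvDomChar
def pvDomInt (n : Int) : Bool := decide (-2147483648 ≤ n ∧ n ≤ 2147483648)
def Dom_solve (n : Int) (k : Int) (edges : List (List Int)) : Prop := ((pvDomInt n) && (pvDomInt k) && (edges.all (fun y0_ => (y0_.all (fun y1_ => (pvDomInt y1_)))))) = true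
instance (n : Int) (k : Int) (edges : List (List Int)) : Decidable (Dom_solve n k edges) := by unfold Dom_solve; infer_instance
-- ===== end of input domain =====

-- B replaces A's recursive DFS (shared visited set) by an iterative frontier BFS per start
-- node; graph build and top-k-degree purple selection are unchanged (objective: alternative).

-- ===== PORT A =====
-- graph build and purple selection: these Python lines are identical in Source A and Source B,
-- so both ports share these two helpers.
def pvGraph (edges : List (List Int)) : PySem.Dict Int (List Int) :=
  edges.foldl
    (fun g e =>
      match e with
      | [u, v] =>
          let g1 := g.insert u (g.getD u [] ++ [v])
          g1.insert v (g1.getD v [] ++ [u])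
      | _ => g)  -- a row that is not [u, v] raises ValueError in Python; excluded by Pre_solve
    PySem.Dict.empty

def pvPurple (g : PySem.Dict Int (List Int)) (n k : Int) : PySem.Set Int :=
  let degree := PySem.List.sorted2
    ((PySem.List.pyRange 1 (n + 1) 1).map (fun i => (((g.getD i []).length : Int), i)))
    (fun p => p.1) (fun p => p.2) true
  PySem.Set.ofList ((PySem.List.slice degree none (some k)).map (fun p => p.2))

-- dfs(node, visited, purple); fuel only makes the recursion structural (never exhausted,
-- see pvDfsA_spec)
def pvDfsA (g : PySem.Dict Int (List Int)) (purple : PySem.Set Int) :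
    Nat → Int → PySem.Set Int → Int × PySem.Set Int
  | 0, _, visited => (0, visited)
  | fuel + 1, node, visited =>
    if node ∈ purple then (0, visited)
    else
      (g.getD node []).foldl
        (fun acc nb =>
          if nb ∈ acc.2 then acc
          else
            let r := pvDfsA g purple fuel nb acc.2
            (acc.1 + r.1, r.2))
        (1, PySem.Set.add visited node)

-- get_max_component_size(purple)
def pvGetMaxA (g : PySem.Dict Int (List Int)) (purple : PySem.Set Int) (n : Int) (fuel : Nat) : Int :=
  ((PySem.List.pyRange 1 (n + 1) 1).foldl
    (fun (acc : Int × PySem.Set Int) node =>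
      if node ∉ acc.2 ∧ node ∉ purple then
        let r := pvDfsA g purple fuel node acc.2
        (max acc.1 r.1, r.2)
      else acc)
    (0, PySem.Set.empty)).1

def solve (n : Int) (k : Int) (edges : List (List Int)) : Int :=
  let graph := pvGraph edges
  if k ≥ n then 0
  else
    let purple := pvPurple graph n k
    pvGetMaxA graph purple n (2 * edges.length + 2)

-- ===== PORT B =====
-- the while-frontier loop; fuel only makes the loop structural (never exhausted,
-- see pvBfsB_spec)
def pvBfsB (g : PySem.Dict Int (List Int)) (purple : PySem.Set Int) :
    Nat → PySem.Set Int → List Int → PySem.Set Int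
  | 0, comp, _ => comp
  | fuel + 1, comp, frontier =>
    if frontier.isEmpty then comp
    else
      let p := frontier.foldl
        (fun (acc : PySem.Set Int × List Int) x =>
          (g.getD x []).foldl
            (fun (acc2 : PySem.Set Int × List Int) y =>
              if y ∉ purple ∧ y ∉ acc2.1 then (PySem.Set.add acc2.1 y, acc2.2 ++ [y])
              else acc2)
            acc)
        (comp, [])
      pvBfsB g purple fuel p.1 p.2

def solve_alt (n : Int) (k : Int) (edges : List (List Int)) : Int :=
  let graph := pvGraph edges
  if k ≥ n then 0
  else
    let purple := pvPurple graph n k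
    ((PySem.List.pyRange 1 (n + 1) 1).foldl
      (fun (acc : Int × PySem.Set Int) s =>
        if s ∈ acc.2 ∨ s ∈ purple then acc
        else
          let comp := pvBfsB graph purple (2 * edges.length + 2) (PySem.Set.ofList [s]) [s]
          (max acc.1 (comp.length : Int), PySem.Set.union acc.2 comp))
      (0, PySem.Set.empty)).1

-- ===== PRECONDITION & SPEC =====
-- Pre_solve excludes rows that are not two-element lists: on those Python's
-- 'for u, v in edges' raises ValueError (in both A and B).
def Pre_solve (n : Int) (k : Int) (edges : List (List Int)) : Prop :=
  ∀ e ∈ edges, e.length = 2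
instance (n : Int) (k : Int) (edges : List (List Int)) : Decidable (Pre_solve n k edges) := by
  unfold Pre_solve; infer_instance

def pvWitness_solve : Int × Int × List (List Int) := (3, 1, [[1, 2], [2, 3]])

def Spec_solve (n : Int) (k : Int) (edges : List (List Int)) (out : Int) : Prop := out = solve_alt n k edges
instance (n : Int) (k : Int) (edges : List (List Int)) (out : Int) : Decidable (Spec_solve n k edges out) := by unfold Spec_solve; infer_instance

-- ===== CLAIM (what is proved, stated in full; the proofs are below) =====
def Claim_equal_solve : Prop := ∀ (n : Int) (k : Int) (edges : List (List Int)), Dom_solve n k edges → Pre_solve n k edges → Spec_solve n k edges (solve n k edges)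

-- ===== LEMMAS AND PROOFS =====
set_option maxRecDepth 4096

-- the support of the graph: all endpoints of well-formed rows
def pvN (edges : List (List Int)) : Finset Int :=
  ((edges.filter (fun e => e.length == 2)).flatMap id).toFinset

theorem pvGraph_step_mem (g : PySem.Dict Int (List Int)) (u v x y : Int) :
    y ∈ ((g.insert u (g.getD u [] ++ [v])).insert v
          (((g.insert u (g.getD u [] ++ [v])).getD v []) ++ [u])).getD x [] ↔
      y ∈ g.getD x [] ∨ (u = x ∧ v = y) ∨ (u = y ∧ v = x) := by
  by_cases hxv : x = v <;> by_cases hxu : x = u <;> by_cases huv : v = u <;>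
    subst_vars <;>
    simp [PySem.Dict.getD_insert, *] <;>
    tauto

theorem pvGraph_mem_aux (x y : Int) :
    ∀ (l : List (List Int)) (g : PySem.Dict Int (List Int)),
      y ∈ (l.foldl
        (fun g e =>
          match e with
          | [u, v] =>
              let g1 := g.insert u (g.getD u [] ++ [v])
              g1.insert v (g1.getD v [] ++ [u])
          | _ => g) g).getD x [] ↔
      y ∈ g.getD x [] ∨ ∃ e ∈ l, e = [x, y] ∨ e = [y, x] := by
  intro l
  induction l with
  | nil => simp
  | cons e l ih =>
    intro g
    rcases e with (_ | ⟨u, (_ | ⟨v, (_ | ⟨w, t⟩)⟩)⟩) <;>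
      simp [List.foldl_cons, ih, pvGraph_step_mem, or_assoc]
  
theorem pvGraph_mem (edges : List (List Int)) (x y : Int) :
    y ∈ (pvGraph edges).getD x [] ↔ ∃ e ∈ edges, e = [x, y] ∨ e = [y, x] := by
  unfold pvGraph
  rw [pvGraph_mem_aux]
  simp [PySem.Dict.getD_empty]

theorem pvGraph_sym (edges : List (List Int)) (x y : Int)
    (h : y ∈ (pvGraph edges).getD x []) : x ∈ (pvGraph edges).getD y [] := by
  rw [pvGraph_mem] at h ⊢
  obtain ⟨e, he, h⟩ := h
  exact ⟨e, he, h.symm.imp id id⟩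

theorem pvGraph_supp (edges : List (List Int)) (x y : Int)
    (h : y ∈ (pvGraph edges).getD x []) : x ∈ pvN edges ∧ y ∈ pvN edges := by
  rw [pvGraph_mem] at h
  obtain ⟨e, he, h⟩ := h
  have hmem : ∀ z, z ∈ e → z ∈ pvN edges := by
    intro z hz
    unfold pvN
    rw [List.mem_toFinset, List.mem_flatMap]
    refine ⟨e, ?_, hz⟩
    rw [List.mem_filter]
    rcases h with h | h <;> subst h <;> simp [he]
  rcases h with h | h <;> subst h
  · exact ⟨hmem _ (by simp), hmem _ (by simp)⟩
  · exact ⟨hmem _ (by simp), hmem _ (by simp)⟩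

theorem pvFlat_len (l : List (List Int)) :
    ((l.filter (fun e => e.length == 2)).flatMap id).length ≤ 2 * l.length := by
  induction l with
  | nil => simp
  | cons e l ih =>
    rw [List.filter_cons]
    by_cases h : (e.length == 2) = true
    · rw [if_pos h, List.flatMap_cons]
      have h2 : e.length = 2 := by simpa using h
      simp only [List.length_append, List.length_cons, id]
      omega
    · rw [if_neg h]
      simp only [List.length_cons]
      omega

theorem pvN_card_le (edges : List (List Int)) : (pvN edges).card ≤ 2 * edges.length := by
  exact le_trans (List.toFinset_card_le _) (pvFlat_len edges)

def pvStep (g : PySem.Dict Int (List Int)) (P : List Int) (x y : Int) : Prop :=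
  x ∉ P ∧ y ∉ P ∧ y ∈ g.getD x []

def pvConn (g : PySem.Dict Int (List Int)) (P : List Int) (x y : Int) : Prop :=
  Relation.ReflTransGen (pvStep g P) x y

def pvStepA (g : PySem.Dict Int (List Int)) (P V : List Int) (x y : Int) : Prop :=
  pvStep g P x y ∧ x ∉ V ∧ y ∉ V

def pvRA (g : PySem.Dict Int (List Int)) (P V : List Int) (x y : Int) : Prop :=
  Relation.ReflTransGen (pvStepA g P V) x y

theorem pvRA_mono (g : PySem.Dict Int (List Int)) (P V₀ Vc : List Int)
    (h : ∀ z, z ∈ V₀ → z ∈ Vc) {x y : Int} (hr : pvRA g P Vc x y) : pvRA g P V₀ x y :=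
  Relation.ReflTransGen.mono (fun _ _ hs => ⟨hs.1, fun h' => hs.2.1 (h _ h'), fun h' => hs.2.2 (h _ h')⟩) hr

def pvDfsPost (g : PySem.Dict Int (List Int)) (P : List Int) (fuel : Nat)
    (node : Int) (V : List Int) : Prop :=
  ∃ D : List Int,
    (pvDfsA g P fuel node V).2 = V ++ D ∧
    (V ++ D).Nodup ∧
    (pvDfsA g P fuel node V).1 = (D.length : Int) ∧
    (∀ z ∈ D, z ∉ P ∧ pvRA g P V node z) ∧
    (node ∉ P → node ∈ D) ∧
    (node ∈ P → D = []) ∧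
    (∀ z ∈ D, ∀ y ∈ g.getD z [], y ∉ P → y ∈ V ++ D)

theorem pvDfsA_fold (g : PySem.Dict Int (List Int)) (P : List Int) (N : Finset Int)
    (hN : ∀ x y, y ∈ g.getD x [] → x ∈ N ∧ y ∈ N) (fuel : Nat)
    (IH : ∀ node V, V.Nodup → node ∉ V → (N \ V.toFinset).card + 2 ≤ fuel →
          pvDfsPost g P fuel node V)
    (node : Int) (V₀ : List Int) (hP : node ∉ P) (h0 : node ∉ V₀)
    (hfuel : (N \ V₀.toFinset).card + 1 ≤ fuel) :
    ∀ (l : List Int), (∀ y ∈ l, y ∈ g.getD node []) →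
    ∀ (D : List Int),
      (V₀ ++ node :: D).Nodup →
      (∀ z ∈ node :: D, z ∉ P ∧ pvRA g P V₀ node z) →
      (∀ z ∈ D, ∀ y ∈ g.getD z [], y ∉ P → y ∈ V₀ ++ node :: D) →
      ∃ D' : List Int,
        (l.foldl
          (fun acc nb =>
            if nb ∈ acc.2 then acc
            else
              let r := pvDfsA g P fuel nb acc.2
              (acc.1 + r.1, r.2))
          ((D.length : Int) + 1, V₀ ++ node :: D)) = ((D'.length : Int) + 1, V₀ ++ node :: D') ∧
        (V₀ ++ node :: D').Nodup ∧
        (∃ E, D' = D ++ E) ∧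
        (∀ z ∈ node :: D', z ∉ P ∧ pvRA g P V₀ node z) ∧
        (∀ z ∈ D', ∀ y ∈ g.getD z [], y ∉ P → y ∈ V₀ ++ node :: D') ∧
        (∀ y ∈ l, y ∉ P → y ∈ V₀ ++ node :: D') := by
  intro l
  induction l with
  | nil =>
    intro _ D hnd hprops hclosed
    exact ⟨D, rfl, hnd, ⟨[], by simp⟩, hprops, hclosed, by simp⟩
  | cons nb l ih =>
    intro hl D hnd hprops hclosed
    have hlrest : ∀ y ∈ l, y ∈ g.getD node [] := fun y hy => hl y (List.mem_cons_of_mem _ hy)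
    have hnbadj : nb ∈ g.getD node [] := hl nb List.mem_cons_self
    rw [List.foldl_cons]
    by_cases hnb : nb ∈ V₀ ++ node :: D
    · rw [if_pos hnb]
      obtain ⟨D', h1, h2, ⟨E, hE⟩, h4, h5, h6⟩ := ih hlrest D hnd hprops hclosed
      refine ⟨D', h1, h2, ⟨E, hE⟩, h4, h5, ?_⟩
      intro y hy hyP
      rcases List.mem_cons.mp hy with rfl | hy
      · subst hE
        simp only [List.mem_append, List.mem_cons] at hnb ⊢
        tauto
      · exact h6 y hy hyP
    · rw [if_neg hnb]
      -- recursive dfs call on nb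
      have hndc : (V₀ ++ node :: D).Nodup := hnd
      have hnodeN : node ∈ N := (hN node nb hnbadj).1
      have hsub : V₀.toFinset ⊆ (V₀ ++ node :: D).toFinset := by
        intro z hz; simp at hz ⊢; tauto
      have hcard : (N \ (V₀ ++ node :: D).toFinset).card < (N \ V₀.toFinset).card := by
        apply Finset.card_lt_card
        refine ⟨?_, ?_⟩
        · intro z hz
          rw [Finset.mem_sdiff] at hz ⊢
          exact ⟨hz.1, fun hc => hz.2 (hsub hc)⟩
        · intro hcon
          have hnodemem : node ∈ N \ V₀.toFinset := Finset.mem_sdiff.mpr ⟨hnodeN, by simpa using h0⟩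
          have h2' := hcon hnodemem
          rw [Finset.mem_sdiff, List.mem_toFinset] at h2'
          exact h2'.2 (by simp)
      obtain ⟨Dn, hV', hnd', hsz, hpropsn, hin, hinP, hclosedn⟩ :=
        IH nb (V₀ ++ node :: D) hndc hnb (by omega)
      have hr : pvDfsA g P fuel nb (V₀ ++ node :: D) =
          ((Dn.length : Int), (V₀ ++ node :: D) ++ Dn) := by
        rw [Prod.ext_iff]; exact ⟨hsz, hV'⟩
      simp only [hr]
      have hassoc : (V₀ ++ node :: D) ++ Dn = V₀ ++ node :: (D ++ Dn) := by simp
      have hsum : (D.length : Int) + 1 + (Dn.length : Int) = ((D ++ Dn).length : Int) + 1 := by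
        simp [List.length_append]; ring
      have hndnew : (V₀ ++ node :: (D ++ Dn)).Nodup := by rw [← hassoc]; exact hnd'
      -- RA transfer for new nodes
      have hRA : ∀ z ∈ Dn, z ∉ P ∧ pvRA g P V₀ node z := by
        intro z hz
        have hznP := (hpropsn z hz).1
        refine ⟨hznP, ?_⟩
        by_cases hnbP : nb ∈ P
        · rw [hinP hnbP] at hz; cases hz
        · have hstep : pvStepA g P V₀ node nb := by
            refine ⟨⟨hP, hnbP, hnbadj⟩, h0, ?_⟩
            intro hcon; exact hnb (List.mem_append.mpr (Or.inl hcon))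
          have hpath : pvRA g P V₀ nb z :=
            pvRA_mono g P V₀ (V₀ ++ node :: D)
              (fun w hw => List.mem_append.mpr (Or.inl hw)) (hpropsn z hz).2
          exact Relation.ReflTransGen.head hstep hpath
      have hpropsnew : ∀ z ∈ node :: (D ++ Dn), z ∉ P ∧ pvRA g P V₀ node z := by
        intro z hz
        rcases List.mem_cons.mp hz with rfl | hz
        · exact hprops z List.mem_cons_self
        · rcases List.mem_append.mp hz with hz | hz
          · exact hprops z (List.mem_cons_of_mem _ hz)
          · exact hRA z hz
      have hclosednew : ∀ z ∈ D ++ Dn, ∀ y ∈ g.getD z [], y ∉ P → y ∈ V₀ ++ node :: (D ++ Dn) := by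
        intro z hz y hy hyP
        rcases List.mem_append.mp hz with hz | hz
        · have := hclosed z hz y hy hyP
          simp only [List.mem_append, List.mem_cons] at this ⊢; tauto
        · have := hclosedn z hz y hy hyP
          rw [hassoc] at this; exact this
      rw [hsum, hassoc]
      obtain ⟨D', h1, h2, ⟨E, hE⟩, h4, h5, h6⟩ := ih hlrest (D ++ Dn) hndnew hpropsnew hclosednew
      refine ⟨D', h1, h2, ⟨Dn ++ E, by rw [hE, List.append_assoc]⟩, h4, h5, ?_⟩
      intro y hy hyP
      rcases List.mem_cons.mp hy with rfl | hy
      · -- nb itself was visited by the recursive call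
        have hnbDn := hin hyP
        subst hE
        simp only [List.mem_append, List.mem_cons] at hnbDn ⊢
        tauto
      · exact h6 y hy hyP

theorem pvDfsA_spec (g : PySem.Dict Int (List Int)) (P : List Int) (N : Finset Int)
    (hN : ∀ x y, y ∈ g.getD x [] → x ∈ N ∧ y ∈ N) :
    ∀ (fuel : Nat) (node : Int) (V : List Int), V.Nodup → node ∉ V →
      (N \ V.toFinset).card + 2 ≤ fuel → pvDfsPost g P fuel node V := by
  intro fuel
  induction fuel with
  | zero => intro node V _ _ hfuel; omega
  | succ fuel IHf =>
    intro node V hnd hnode hfuel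
    by_cases hP : node ∈ P
    · exact ⟨[], by simp [pvDfsA, hP], by simpa, by simp [pvDfsA, hP],
        by simp, fun h => absurd hP h, fun _ => rfl, by simp⟩
    · have hadd : PySem.Set.add V node = V ++ [node] := PySem.Set.add_of_not_mem hnode
      have hnd1 : (V ++ node :: ([] : List Int)).Nodup := by
        exact hnd.append (List.nodup_singleton _)
          (fun a ha hb => hnode ((List.mem_singleton.mp hb) ▸ ha))
      have hprops1 : ∀ z ∈ [node], z ∉ P ∧ pvRA g P V node z := by
        intro z hz; rcases List.mem_singleton.mp hz with rfl
        exact ⟨hP, Relation.ReflTransGen.refl⟩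
      obtain ⟨D', h1, h2, ⟨E, hE⟩, h4, h5, h6⟩ :=
        pvDfsA_fold g P N hN fuel IHf node V hP hnode (by omega)
          (g.getD node []) (fun y hy => hy) [] hnd1 hprops1 (by simp)
      refine ⟨node :: D', ?_, h2, ?_, h4, fun _ => List.mem_cons_self, fun h => absurd h hP, ?_⟩
      · show (pvDfsA g P (fuel + 1) node V).2 = V ++ node :: D'
        simp only [pvDfsA, if_neg hP, hadd]
        have := congrArg Prod.snd h1
        simpa using this
      · show (pvDfsA g P (fuel + 1) node V).1 = ((node :: D').length : Int)
        simp only [pvDfsA, if_neg hP, hadd]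
        have h1' := congrArg Prod.fst h1
        simp only [List.length_nil, Nat.cast_zero, zero_add, List.length_cons] at h1' ⊢
        rw [h1']
        push_cast; ring
      · intro z hz y hy hyP
        rcases List.mem_cons.mp hz with rfl | hz
        · exact h6 y hy hyP
        · exact h5 z hz y hy hyP

theorem pvClosed_complete (g : PySem.Dict Int (List Int)) (P : List Int) (C : List Int) (s : Int)
    (hclosed : ∀ z ∈ C, ∀ y ∈ g.getD z [], y ∉ P → y ∈ C) (hs : s ∈ C) :
    ∀ z, pvConn g P s z → z ∈ C := by
  intro z h
  induction h with
  | refl => exact hs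
  | tail _ hstep ih => exact hclosed _ ih _ hstep.2.2 hstep.2.1

theorem pvBfs_inner (g : PySem.Dict Int (List Int)) (P : List Int) (ys : List Int) :
    ∀ (acc : PySem.Set Int × List Int),
      ∃ E, (ys.foldl
        (fun (acc2 : PySem.Set Int × List Int) y =>
          if y ∉ P ∧ y ∉ acc2.1 then (PySem.Set.add acc2.1 y, acc2.2 ++ [y])
          else acc2) acc) = (acc.1 ++ E, acc.2 ++ E) ∧
      (∀ y ∈ E, y ∉ P ∧ y ∈ ys) ∧
      (∀ y ∈ ys, y ∉ P → y ∈ acc.1 ++ E) ∧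
      (acc.1.Nodup → (acc.1 ++ E).Nodup) := by
  induction ys with
  | nil => intro acc; exact ⟨[], by simp, by simp, by simp, by simpa using id⟩
  | cons y ys ih =>
    intro acc
    rw [List.foldl_cons]
    by_cases hc : y ∉ P ∧ y ∉ acc.1
    · rw [if_pos hc]
      have hadd : PySem.Set.add acc.1 y = acc.1 ++ [y] := PySem.Set.add_of_not_mem hc.2
      obtain ⟨E, h1, h2, h3, h4⟩ := ih (PySem.Set.add acc.1 y, acc.2 ++ [y])
      refine ⟨y :: E, ?_, ?_, ?_, ?_⟩
      · rw [h1]; simp [hadd]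
      · intro z hz
        rcases List.mem_cons.mp hz with rfl | hz
        · exact ⟨hc.1, List.mem_cons_self⟩
        · exact ⟨(h2 z hz).1, List.mem_cons_of_mem _ (h2 z hz).2⟩
      · intro z hz hzP
        rcases List.mem_cons.mp hz with rfl | hz
        · simp
        · have := h3 z hz hzP
          simp only [hadd, List.append_assoc, List.singleton_append, List.mem_append,
            List.mem_cons] at this ⊢
          tauto
      · intro hnd
        have hndacc : (acc.1 ++ [y]).Nodup :=
          hnd.append (List.nodup_singleton _)
            (fun a ha hb => hc.2 ((List.mem_singleton.mp hb) ▸ ha))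
        have := h4 (by rw [hadd]; exact hndacc)
        simpa [hadd, List.append_assoc] using this
    · rw [if_neg hc]
      obtain ⟨E, h1, h2, h3, h4⟩ := ih acc
      refine ⟨E, h1, fun z hz => ⟨(h2 z hz).1, List.mem_cons_of_mem _ (h2 z hz).2⟩, ?_, h4⟩
      intro z hz hzP
      rcases List.mem_cons.mp hz with rfl | hz
      · have hzin : z ∈ acc.1 := by
          by_contra hcon; exact hc ⟨hzP, hcon⟩
        exact List.mem_append.mpr (Or.inl hzin)
      · exact h3 z hz hzP

theorem pvBfs_pass (g : PySem.Dict Int (List Int)) (P : List Int) (F : List Int) :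
    ∀ (acc : PySem.Set Int × List Int),
      ∃ E, (F.foldl
        (fun (acc : PySem.Set Int × List Int) x =>
          (g.getD x []).foldl
            (fun (acc2 : PySem.Set Int × List Int) y =>
              if y ∉ P ∧ y ∉ acc2.1 then (PySem.Set.add acc2.1 y, acc2.2 ++ [y])
              else acc2) acc) acc) = (acc.1 ++ E, acc.2 ++ E) ∧
      (∀ y ∈ E, y ∉ P ∧ ∃ x ∈ F, y ∈ g.getD x []) ∧
      (∀ x ∈ F, ∀ y ∈ g.getD x [], y ∉ P → y ∈ acc.1 ++ E) ∧
      (acc.1.Nodup → (acc.1 ++ E).Nodup) := by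
  induction F with
  | nil => intro acc; exact ⟨[], by simp, by simp, by simp, by simpa using id⟩
  | cons x F ih =>
    intro acc
    rw [List.foldl_cons]
    obtain ⟨E1, h1, h2, h3, h4⟩ := pvBfs_inner g P (g.getD x []) acc
    rw [h1]
    obtain ⟨E2, k1, k2, k3, k4⟩ := ih (acc.1 ++ E1, acc.2 ++ E1)
    refine ⟨E1 ++ E2, ?_, ?_, ?_, ?_⟩
    · rw [k1]; simp
    · intro z hz
      rcases List.mem_append.mp hz with hz | hz
      · exact ⟨(h2 z hz).1, x, List.mem_cons_self, (h2 z hz).2⟩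
      · obtain ⟨hzP, x', hx', hadj⟩ := k2 z hz
        exact ⟨hzP, x', List.mem_cons_of_mem _ hx', hadj⟩
    · intro x' hx' z hz hzP
      rcases List.mem_cons.mp hx' with rfl | hx'
      · have := h3 z hz hzP
        simp only [List.mem_append] at this ⊢; tauto
      · have := k3 x' hx' z hz hzP
        simp only [List.mem_append] at this ⊢; tauto
    · intro hnd
      have := k4 (h4 hnd)
      simpa [List.append_assoc] using this

theorem pvBfsB_nil_frontier (g : PySem.Dict Int (List Int)) (P : List Int) :
    ∀ (fuel : Nat) (comp : List Int), pvBfsB g P fuel comp [] = comp := by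
  intro fuel comp; cases fuel <;> simp [pvBfsB]

theorem pvBfsB_spec (g : PySem.Dict Int (List Int)) (P : List Int) (N : Finset Int)
    (hN : ∀ x y, y ∈ g.getD x [] → x ∈ N ∧ y ∈ N) (s : Int) :
    ∀ (fuel : Nat) (comp frontier : List Int), comp.Nodup →
      (∀ x ∈ frontier, x ∈ comp) →
      (∀ z ∈ comp, z ∉ P ∧ pvConn g P s z) →
      (∀ z ∈ comp, z ∉ frontier → ∀ y ∈ g.getD z [], y ∉ P → y ∈ comp) →
      s ∈ comp →
      (N \ comp.toFinset).card + 2 ≤ fuel →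
      (pvBfsB g P fuel comp frontier).Nodup ∧
      (∀ z ∈ pvBfsB g P fuel comp frontier, z ∉ P ∧ pvConn g P s z) ∧
      (∀ z, pvConn g P s z → z ∈ pvBfsB g P fuel comp frontier) := by
  intro fuel
  induction fuel with
  | zero => intro comp frontier _ _ _ _ _ hfuel; omega
  | succ fuel IH =>
    intro comp frontier hnd hFc hprops hclosed hs hfuel
    by_cases hf : frontier.isEmpty
    · rw [show pvBfsB g P (fuel + 1) comp frontier = comp by simp [pvBfsB, hf]]
      have hfe : frontier = [] := List.isEmpty_iff.mp hf
      subst hfe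
      exact ⟨hnd, hprops,
        pvClosed_complete g P comp s (fun z hz => hclosed z hz (by simp)) hs⟩
    · have hstep : pvBfsB g P (fuel + 1) comp frontier =
          pvBfsB g P fuel
            ((frontier.foldl
              (fun (acc : PySem.Set Int × List Int) x =>
                (g.getD x []).foldl
                  (fun (acc2 : PySem.Set Int × List Int) y =>
                    if y ∉ P ∧ y ∉ acc2.1 then (PySem.Set.add acc2.1 y, acc2.2 ++ [y])
                    else acc2) acc) (comp, [])).1)
            ((frontier.foldl
              (fun (acc : PySem.Set Int × List Int) x =>
                (g.getD x []).foldl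
                  (fun (acc2 : PySem.Set Int × List Int) y =>
                    if y ∉ P ∧ y ∉ acc2.1 then (PySem.Set.add acc2.1 y, acc2.2 ++ [y])
                    else acc2) acc) (comp, [])).2) := by
        simp [pvBfsB, hf]
      obtain ⟨E, h1, h2, h3, h4⟩ := pvBfs_pass g P frontier (comp, [])
      rw [hstep, h1]
      simp only [List.nil_append]
      have hndE : (comp ++ E).Nodup := h4 hnd
      have hdisj : ∀ e ∈ E, e ∉ comp := by
        have hd := List.disjoint_of_nodup_append hndE
        exact fun e he hcon => hd hcon he
      have hpropsE : ∀ z ∈ comp ++ E, z ∉ P ∧ pvConn g P s z := by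
        intro z hz
        rcases List.mem_append.mp hz with hz | hz
        · exact hprops z hz
        · obtain ⟨hzP, x, hx, hadj⟩ := h2 z hz
          refine ⟨hzP, ?_⟩
          have hx' := hprops x (hFc x hx)
          exact Relation.ReflTransGen.tail hx'.2 ⟨hx'.1, hzP, hadj⟩
      have hclosedE : ∀ z ∈ comp ++ E, z ∉ E → ∀ y ∈ g.getD z [], y ∉ P → y ∈ comp ++ E := by
        intro z hz hzE y hy hyP
        rcases List.mem_append.mp hz with hz | hz
        · by_cases hzF : z ∈ frontier
          · exact h3 z hzF y hy hyP
          · exact List.mem_append.mpr (Or.inl (hclosed z hz hzF y hy hyP))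
        · exact absurd hz hzE
      by_cases hE : E = []
      · subst hE
        rw [show comp ++ ([] : List Int) = comp by simp] at *
        rw [pvBfsB_nil_frontier]
        exact ⟨hnd, hprops,
          pvClosed_complete g P comp s (fun z hz => hclosedE z (by simpa using hz) (by simp)) hs⟩
      · have hfuel' : (N \ (comp ++ E).toFinset).card + 2 ≤ fuel := by
          obtain ⟨e, he⟩ := List.exists_mem_of_ne_nil E hE
          have heN : e ∈ N := by
            obtain ⟨_, x, _, hadj⟩ := h2 e he
            exact (hN x e hadj).2
          have hlt : (N \ (comp ++ E).toFinset).card < (N \ comp.toFinset).card := by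
            apply Finset.card_lt_card
            refine ⟨?_, ?_⟩
            · intro z hz
              rw [Finset.mem_sdiff] at hz ⊢
              refine ⟨hz.1, fun hc => hz.2 ?_⟩
              rw [List.mem_toFinset] at hc ⊢
              exact List.mem_append.mpr (Or.inl hc)
            · intro hcon
              have hemem : e ∈ N \ comp.toFinset :=
                Finset.mem_sdiff.mpr ⟨heN, by simpa using hdisj e he⟩
              have h2' := hcon hemem
              rw [Finset.mem_sdiff, List.mem_toFinset] at h2'
              exact h2'.2 (List.mem_append.mpr (Or.inr he))
          omega
        exact IH (comp ++ E) E hndE (fun x hx => List.mem_append.mpr (Or.inr hx))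
          hpropsE hclosedE (List.mem_append.mpr (Or.inl hs)) hfuel'

theorem pvRA_to_conn (g : PySem.Dict Int (List Int)) (P V : List Int) {x y : Int}
    (h : pvRA g P V x y) : pvConn g P x y :=
  Relation.ReflTransGen.mono (fun _ _ hs => hs.1) h

theorem pvRA_of_conn (g : PySem.Dict Int (List Int)) (P V : List Int)
    (hsym : ∀ x y, y ∈ g.getD x [] → x ∈ g.getD y [])
    (hVinv : ∀ z ∈ V, z ∉ P ∧ ∀ y ∈ g.getD z [], y ∉ P → y ∈ V)
    {s : Int} (hsV : s ∉ V) :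
    ∀ z, pvConn g P s z → pvRA g P V s z ∧ z ∉ V := by
  intro z h
  induction h with
  | refl => exact ⟨Relation.ReflTransGen.refl, hsV⟩
  | @tail b c _ hstep ih =>
    have hcV : c ∉ V := by
      intro hc
      have hb : b ∈ V := (hVinv c hc).2 b (hsym _ _ hstep.2.2) hstep.1
      exact ih.2 hb
    exact ⟨Relation.ReflTransGen.tail ih.1 ⟨hstep, ih.2, hcV⟩, hcV⟩


theorem pvRA_mem_D (g : PySem.Dict Int (List Int)) (P V D : List Int) (s : Int)
    (hDself : s ∈ D)
    (hDclosed : ∀ z ∈ D, ∀ y ∈ g.getD z [], y ∉ P → y ∈ V ++ D) :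
    ∀ z, pvRA g P V s z → z ∈ D := by
  intro z h
  induction h with
  | refl => exact hDself
  | tail _ hstep ih =>
    have hm := hDclosed _ ih _ hstep.1.2.2 hstep.1.2.1
    rcases List.mem_append.mp hm with h | h
    · exact absurd h hstep.2.2
    · exact h

theorem pvLoop_eq (g : PySem.Dict Int (List Int)) (P : List Int) (N : Finset Int)
    (hsym : ∀ x y, y ∈ g.getD x [] → x ∈ g.getD y [])
    (hN : ∀ x y, y ∈ g.getD x [] → x ∈ N ∧ y ∈ N)
    (FUEL : Nat) (hF : N.card + 2 ≤ FUEL) :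
    ∀ (starts : List Int) (bA bB : Int) (V seen : List Int),
      bA = bB → (∀ z, z ∈ V ↔ z ∈ seen) → V.Nodup → seen.Nodup →
      (∀ z ∈ V, z ∉ P ∧ ∀ y ∈ g.getD z [], y ∉ P → y ∈ V) →
      (starts.foldl
        (fun (acc : Int × PySem.Set Int) node =>
          if node ∉ acc.2 ∧ node ∉ P then
            let r := pvDfsA g P FUEL node acc.2
            (max acc.1 r.1, r.2)
          else acc) (bA, V)).1 =
      (starts.foldl
        (fun (acc : Int × PySem.Set Int) s =>
          if s ∈ acc.2 ∨ s ∈ P then acc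
          else
            let comp := pvBfsB g P FUEL (PySem.Set.ofList [s]) [s]
            (max acc.1 (comp.length : Int), PySem.Set.union acc.2 comp)) (bB, seen)).1 := by
  intro starts
  induction starts with
  | nil => intro bA bB V seen hb _ _ _ _; simpa using hb
  | cons s starts ih =>
    intro bA bB V seen hb hmem hndV hndseen hVinv
    rw [List.foldl_cons, List.foldl_cons]
    by_cases hsv : s ∈ V ∨ s ∈ P
    · have hA : ¬(s ∉ V ∧ s ∉ P) := by tauto
      have hB : s ∈ seen ∨ s ∈ P := by
        rcases hsv with h | h
        · exact Or.inl ((hmem s).mp h)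
        · exact Or.inr h
      rw [if_neg hA, if_pos hB]
      exact ih bA bB V seen hb hmem hndV hndseen hVinv
    · push_neg at hsv
      obtain ⟨hsV, hsP⟩ := hsv
      have hB : ¬(s ∈ seen ∨ s ∈ P) := by
        intro h
        rcases h with h | h
        · exact hsV ((hmem s).mpr h)
        · exact hsP h
      rw [if_pos ⟨hsV, hsP⟩, if_neg hB]
      have hfuelA : (N \ V.toFinset).card + 2 ≤ FUEL := by
        have := Finset.card_le_card (Finset.sdiff_subset (s := N) (t := V.toFinset))
        omega
      obtain ⟨D, hD2, hDnd, hD1, hDprops, hDself, _, hDclosed⟩ :=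
        pvDfsA_spec g P N hN FUEL s V hndV hsV hfuelA
      have hof : PySem.Set.ofList [s] = [s] :=
        PySem.Set.ofList_eq_self_of_nodup [s] (List.nodup_singleton s)
      have hfuelB : (N \ ([s] : List Int).toFinset).card + 2 ≤ FUEL := by
        have := Finset.card_le_card (Finset.sdiff_subset (s := N) (t := ([s] : List Int).toFinset))
        omega
      obtain ⟨hCnd, hCprops, hCcompl⟩ :=
        pvBfsB_spec g P N hN s FUEL [s] [s] (List.nodup_singleton s)
          (fun x hx => hx)
          (by intro z hz; rcases List.mem_singleton.mp hz with rfl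
              exact ⟨hsP, Relation.ReflTransGen.refl⟩)
          (by intro z hz hz2; exact absurd hz hz2)
          List.mem_cons_self hfuelB
      have hDiff : ∀ z, z ∈ D ↔ pvConn g P s z := by
        intro z
        constructor
        · intro hz; exact pvRA_to_conn g P V (hDprops z hz).2
        · intro hconn
          exact pvRA_mem_D g P V D s (hDself hsP) hDclosed z
            (pvRA_of_conn g P V hsym hVinv hsV z hconn).1
      have hciff : ∀ z, z ∈ pvBfsB g P FUEL [s] [s] ↔ pvConn g P s z :=
        fun z => ⟨fun h => (hCprops z h).2, fun h => hCcompl z h⟩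
      have hDcomp : ∀ z, z ∈ D ↔ z ∈ pvBfsB g P FUEL [s] [s] :=
        fun z => (hDiff z).trans (hciff z).symm
      have hDnd' : D.Nodup := (List.nodup_append.mp hDnd).2.1
      have hperm : D.Perm (pvBfsB g P FUEL [s] [s]) :=
        (List.perm_ext_iff_of_nodup hDnd' hCnd).mpr hDcomp
      have hlen : D.length = (pvBfsB g P FUEL [s] [s]).length := hperm.length_eq
      simp only [hD1, hD2, hof]
      apply ih
      · rw [hb, hlen]
      · intro z
        rw [List.mem_append, PySem.Set.mem_union, hmem z, hDcomp z]
      · exact hDnd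
      · exact PySem.Set.nodup_union seen _ hndseen
      · intro z hz
        rcases List.mem_append.mp hz with hz | hz
        · refine ⟨(hVinv z hz).1, ?_⟩
          intro y hy hyP
          exact List.mem_append.mpr (Or.inl ((hVinv z hz).2 y hy hyP))
        · exact ⟨(hDprops z hz).1, fun y hy hyP => hDclosed z hz y hy hyP⟩

theorem pvMain_eq (g : PySem.Dict Int (List Int)) (P : List Int) (N : Finset Int)
    (hsym : ∀ x y, y ∈ g.getD x [] → x ∈ g.getD y [])
    (hN : ∀ x y, y ∈ g.getD x [] → x ∈ N ∧ y ∈ N)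
    (FUEL : Nat) (hF : N.card + 2 ≤ FUEL) (n : Int) :
    pvGetMaxA g P n FUEL =
    ((PySem.List.pyRange 1 (n + 1) 1).foldl
      (fun (acc : Int × PySem.Set Int) s =>
        if s ∈ acc.2 ∨ s ∈ P then acc
        else
          let comp := pvBfsB g P FUEL (PySem.Set.ofList [s]) [s]
          (max acc.1 (comp.length : Int), PySem.Set.union acc.2 comp))
      (0, PySem.Set.empty)).1 := by
  unfold pvGetMaxA
  exact pvLoop_eq g P N hsym hN FUEL hF (PySem.List.pyRange 1 (n + 1) 1) 0 0 [] []
    rfl (fun z => Iff.rfl) List.nodup_nil List.nodup_nil (by simp)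

-- ===== VERDICT (by name: the statement is the Claim_ definition above) =====
theorem solve_spec : Claim_equal_solve := by
  intro n k edges _ _
  unfold Spec_solve solve solve_alt
  by_cases hk : k ≥ n
  · simp [hk]
  · simp only [hk, if_false]
    exact pvMain_eq (pvGraph edges) (pvPurple (pvGraph edges) n k) (pvN edges)
      (pvGraph_sym edges) (pvGraph_supp edges)
      (2 * edges.length + 2) (by have := pvN_card_le edges; omega) n
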